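-- pv_equiv track=rewrite | github.com/iamankitroy/PIZSA | PIZSA_v2_source/scripts/src_main/altloc_filter.py | altloc_filter
-- ===== SOURCE A (Python) =====
-- def altloc_filter(input_lines):
--
-- 	filtered_pdb = []
-- 	altlocs = {}
--
-- 	for line in input_lines:
-- 		if line[0:4] == 'ATOM':
-- 			line = line.strip()
-- 			resna = line[16:20].strip()
-- 			if len(resna) > 3:
-- 				atom_name = line[12:16]
-- 				chain = line[21:22]
-- 				resnum = line[22:26]
-- 				occupancy = line[55:61]
-- 				sig = ':'.join([atom_name, resnum, chain])
-- 				if sig in altlocs.keys():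
-- 					if occupancy > altlocs[sig][0]:
-- 						line = line.replace(line[16:20], ' ' + line[17:20])
-- 						altlocs[sig][0] = occupancy
-- 						altlocs[sig][1] = line
-- 					else:
-- 						pass
-- 				else:
-- 					line = line.replace(line[16:20], ' ' + line[17:20])
-- 					altlocs.update({sig : [occupancy, line]})
-- 			else:
-- 				filtered_pdb.append(line)
--
-- 	for element in altlocs.keys():
-- 		filtered_pdb.append(altlocs[element][1])
--
-- 	return filtered_pdb
-- ===== SOURCE B (Python) =====
-- def altloc_filter(input_lines):
--     # Staged passes: strip ATOM records, split them into plain records and altloc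
--     # candidate triples, then emit one winner per signature (first-seen order) by
--     # rescanning the candidates with max (first-maximal = keep-first tie rule).
--     recs = [l.strip() for l in input_lines if l[0:4] == 'ATOM']
--     plain = [l for l in recs if len(l[16:20].strip()) <= 3]
--     alts = [(':'.join([l[12:16], l[22:26], l[21:22]]), l[55:61],
--              l.replace(l[16:20], ' ' + l[17:20]))
--             for l in recs if len(l[16:20].strip()) > 3]
--     out = list(plain)
--     for sig in dict.fromkeys(c[0] for c in alts):
--         out.append(max((c for c in alts if c[0] == sig), key=lambda c: c[1])[2])
--     return out
-- ===== Notes on version B (the rewrite author's own statement) =====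
-- stated objective: alternative
-- what changed: A is one stateful scan that threads a dict of running bests (compare-and-overwrite per altloc line) and then walks the dict; B is staged passes with no running state: comprehensions split the stripped ATOM records into plain lines and altloc candidate triples, then for each first-seen signature (dict.fromkeys dedup) it rescans the candidates with max(key=occupancy), whose first-maximal rule reproduces A's strictly-greater/keep-first tie-breaking.
import Mathlib
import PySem

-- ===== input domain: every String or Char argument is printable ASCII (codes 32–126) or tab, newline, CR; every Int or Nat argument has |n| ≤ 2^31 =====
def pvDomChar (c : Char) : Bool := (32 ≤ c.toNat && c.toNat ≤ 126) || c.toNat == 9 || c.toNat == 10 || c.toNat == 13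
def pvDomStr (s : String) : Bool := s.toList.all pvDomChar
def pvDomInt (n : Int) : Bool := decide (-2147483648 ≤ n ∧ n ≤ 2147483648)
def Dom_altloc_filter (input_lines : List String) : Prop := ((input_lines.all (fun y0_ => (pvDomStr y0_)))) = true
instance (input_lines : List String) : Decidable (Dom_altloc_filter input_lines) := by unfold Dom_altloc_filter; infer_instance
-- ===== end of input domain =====

-- B replaces A's single stateful scan (dict of running bests, compare-and-overwrite)
-- by staged passes: split the records by comprehensions, then pick each first-seen
-- signature's first maximal candidate by rescanning; objective: alternative, same result.

-- ===== PORT A =====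
-- line.replace(line[16:20], ' ' + line[17:20]) — the identical subexpression of both Pythons
def pvFix (line : String) : String :=
  PySem.Str.replace line (PySem.Str.slice line (some 16) (some 20))
    (String.ofList (' ' :: (PySem.Str.slice line (some 17) (some 20)).toList))

def pvStepA (st : List String × PySem.Dict String (String × String)) (line : String) :
    List String × PySem.Dict String (String × String) :=
  if PySem.Str.slice line (some 0) (some 4) == "ATOM" then
    let line := PySem.Str.strip line
    let resna := PySem.Str.strip (PySem.Str.slice line (some 16) (some 20))
    if PySem.Str.len resna > 3 then
      let atom_name := PySem.Str.slice line (some 12) (some 16)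
      let chain := PySem.Str.slice line (some 21) (some 22)
      let resnum := PySem.Str.slice line (some 22) (some 26)
      let occupancy := PySem.Str.slice line (some 55) (some 61)
      let sig := PySem.Str.join ":" [atom_name, resnum, chain]
      if st.2.contains sig then
        -- altlocs[sig][0]: key present, so the getD default is never used
        if (st.2.getD sig ("", "")).1 < occupancy then
          (st.1, st.2.insert sig (occupancy, pvFix line))
        else st
      else (st.1, st.2.insert sig (occupancy, pvFix line))
    else (st.1 ++ [line], st.2)
  else st

def altloc_filter (input_lines : List String) : List String :=
  let st := input_lines.foldl pvStepA ([], PySem.Dict.empty)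
  -- for element in altlocs.keys(): append altlocs[element][1]  (key present: default unused)
  st.2.keys.foldl (fun acc k => acc ++ [(st.2.getD k ("", "")).2]) st.1

-- ===== PORT B =====
-- Source B's three comprehensions (recs / plain / alts), as named stages
def pvRecsB (input_lines : List String) : List String :=
  (input_lines.filter
    (fun l => PySem.Str.slice l (some 0) (some 4) == "ATOM")).map PySem.Str.strip

def pvPlainB (input_lines : List String) : List String :=
  (pvRecsB input_lines).filter
    (fun l => PySem.Str.len (PySem.Str.strip (PySem.Str.slice l (some 16) (some 20))) ≤ 3)

def pvAltsB (input_lines : List String) : List (String × String × String) :=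
  ((pvRecsB input_lines).filter
    (fun l => PySem.Str.len (PySem.Str.strip (PySem.Str.slice l (some 16) (some 20))) > 3)).map
    (fun l => (PySem.Str.join ":" [PySem.Str.slice l (some 12) (some 16),
                 PySem.Str.slice l (some 22) (some 26), PySem.Str.slice l (some 21) (some 22)],
               PySem.Str.slice l (some 55) (some 61), pvFix l))

def altloc_filter_alt (input_lines : List String) : List String :=
  -- for sig in dict.fromkeys(…): append max(group, key=occupancy)[2]; groups nonempty, maxD default unused
  (PySem.List.dedup ((pvAltsB input_lines).map (fun c => c.1))).foldl
    (fun out sig =>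
      out ++ [(PySem.List.maxD ((pvAltsB input_lines).filter (fun c => c.1 == sig))
                (fun c => c.2.1) ("", "", "")).2.2])
    (pvPlainB input_lines)

-- ===== PRECONDITION & SPEC =====
def Spec_altloc_filter (input_lines : List String) (out : List String) : Prop := out = altloc_filter_alt input_lines
instance (input_lines : List String) (out : List String) : Decidable (Spec_altloc_filter input_lines out) := by unfold Spec_altloc_filter; infer_instance

-- ===== CLAIM (what is proved, stated in full; the proofs are below) =====
def Claim_equal_altloc_filter : Prop := ∀ (input_lines : List String), Dom_altloc_filter input_lines → Spec_altloc_filter input_lines (altloc_filter input_lines)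

-- ===== LEMMAS AND PROOFS =====

-- A's dict update in the altloc branch, on the underlying association list
def pvUpA (sig occ fix : String) : List (String × String × String) → List (String × String × String)
  | [] => [(sig, (occ, fix))]
  | p :: rest => if p.1 = sig then
      (if p.2.1 < occ then (sig, (occ, fix)) :: rest else p :: rest)
    else p :: pvUpA sig occ fix rest

-- A's dict operation in the altloc branch, as one function of the dict
def pvDictA (sig occ fix : String) (d : PySem.Dict String (String × String)) :
    PySem.Dict String (String × String) :=
  if d.contains sig then
    (if (d.getD sig ("", "")).1 < occ then d.insert sig (occ, fix) else d)
  else d.insert sig (occ, fix)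

-- record made of an (already stripped) altloc line: (sig, occ, fixed)
def pvMk (l : String) : String × String × String :=
  (PySem.Str.join ":" [PySem.Str.slice l (some 12) (some 16),
     PySem.Str.slice l (some 22) (some 26), PySem.Str.slice l (some 21) (some 22)],
   PySem.Str.slice l (some 55) (some 61), pvFix l)

-- first-winner of a candidate group (keep-first on ties), and per-signature stored value
def pvSel (c : String × String × String) (cs : List (String × String × String)) :
    String × String × String :=
  cs.foldl (fun b x => if b.2.1 < x.2.1 then x else b) c

def pvM (alts : List (String × String × String)) (k : String) : String × String :=
  match alts.filter (fun c => c.1 == k) with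
  | [] => ("", "")
  | c :: cs => (pvSel c cs).2

lemma pvDictA_eq (sig occ fix : String) : ∀ la, (la.map (fun p => p.1)).Nodup →
    pvDictA sig occ fix (PySem.Dict.mk la) = PySem.Dict.mk (pvUpA sig occ fix la) := by
  intro la h
  induction la with
  | nil =>
      simp [pvDictA, pvUpA, PySem.Dict.contains, PySem.Dict.insert]
  | cons p rest ih =>
      simp only [List.map_cons, List.nodup_cons] at h
      obtain ⟨hni, hrest⟩ := h
      by_cases hp : p.1 = sig
      · have hrepl : rest.map (fun q => if q.1 = sig then (sig, (occ, fix)) else q) = rest := by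
          refine (List.map_congr_left ?_).trans (List.map_id rest)
          intro q hq
          have : q.1 ≠ sig := by
            intro e
            exact hni (by rw [hp, ← e]; exact List.mem_map.mpr ⟨q, hq, rfl⟩)
          simp [this]
        by_cases hlt : p.2.1 < occ
        · simp [pvDictA, pvUpA, PySem.Dict.contains, PySem.Dict.insert, PySem.Dict.getD,
            PySem.Dict.get?, hp, hlt, hrepl]
        · simp [pvDictA, pvUpA, PySem.Dict.contains, PySem.Dict.getD,
            PySem.Dict.get?, hp, hlt]
      · have hb : (p.1 == sig) = false := by simp [hp]
        have ihr := ih hrest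
        have hins : ∀ v : String × String, (PySem.Dict.mk (p :: rest)).insert sig v
            = PySem.Dict.mk (p :: ((PySem.Dict.mk rest).insert sig v).items) := by
          intro v
          by_cases hc : rest.any (fun q => (q.1 == sig)) = true <;>
            simp [PySem.Dict.insert, PySem.Dict.contains, hb, hc, hp]
        have hcont : (PySem.Dict.mk (p :: rest)).contains sig
            = (PySem.Dict.mk rest).contains sig := by
          simp [PySem.Dict.contains, hb]
        have hgetD : (PySem.Dict.mk (p :: rest)).getD sig ("", "")
            = (PySem.Dict.mk rest).getD sig ("", "") := by
          simp [PySem.Dict.getD, PySem.Dict.get?, hb]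
        simp only [pvUpA, if_neg hp]
        unfold pvDictA at ihr ⊢
        rw [hcont, hgetD]
        by_cases hc : ((PySem.Dict.mk rest).contains sig) = true
        · by_cases hlt : ((PySem.Dict.mk rest).getD sig ("", "")).1 < occ
          · rw [if_pos hc, if_pos hlt, hins]
            rw [if_pos hc, if_pos hlt] at ihr
            rw [ihr]
          · rw [if_pos hc, if_neg hlt]
            rw [if_pos hc, if_neg hlt] at ihr
            have hitems : rest = pvUpA sig occ fix rest := congrArg PySem.Dict.items ihr
            rw [← hitems]
        · rw [if_neg hc, hins]
          rw [if_neg hc] at ihr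
          rw [ihr]

lemma pvKeys_upA (sig occ fix : String) : ∀ la,
    (pvUpA sig occ fix la).map (fun p => p.1) =
      (if sig ∈ la.map (fun p => p.1) then la.map (fun p => p.1)
       else la.map (fun p => p.1) ++ [sig]) := by
  intro la
  induction la with
  | nil => simp [pvUpA]
  | cons p rest ih =>
      by_cases hp : p.1 = sig
      · by_cases hlt : p.2.1 < occ <;>
          simp [pvUpA, hp, hlt]
      · have hne : ¬ sig = p.1 := fun e => hp e.symm
        by_cases hm : sig ∈ rest.map (fun p => p.1) <;>
          simp [pvUpA, hp, hm, ih, hne]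

lemma pvNodup_upA (sig occ fix : String) (la : List (String × String × String))
    (h : (la.map (fun p => p.1)).Nodup) :
    ((pvUpA sig occ fix la).map (fun p => p.1)).Nodup := by
  rw [pvKeys_upA]
  by_cases hm : sig ∈ la.map (fun p => p.1)
  · simpa [hm] using h
  · simp only [hm, if_false]
    refine List.Nodup.append h (List.nodup_singleton sig) ?_
    intro x hx hb
    simp only [List.mem_singleton] at hb
    subst hb
    exact hm hx

-- A's scan, characterised: plain lines accumulate, the dict folds pvUpA over the records
lemma pvFoldA (lines : List String) : ∀ (p : List String) la, (la.map (fun q => q.1)).Nodup →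
    lines.foldl pvStepA (p, PySem.Dict.mk la) =
      (p ++ pvPlainB lines,
       PySem.Dict.mk ((pvAltsB lines).foldl (fun d r => pvUpA r.1 r.2.1 r.2.2 d) la)) := by
  induction lines with
  | nil => intro p la _; simp [pvPlainB, pvRecsB, pvAltsB]
  | cons x xs ih =>
      intro p la h
      by_cases hA : (PySem.Str.slice x (some 0) (some 4) == "ATOM") = true
      · have hrecs : pvRecsB (x :: xs) = PySem.Str.strip x :: pvRecsB xs := by
          simp [pvRecsB, hA]
        by_cases hb3 : PySem.Str.len (PySem.Str.strip
            (PySem.Str.slice (PySem.Str.strip x) (some 16) (some 20))) > 3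
        · have hle : ¬ PySem.Str.len (PySem.Str.strip
              (PySem.Str.slice (PySem.Str.strip x) (some 16) (some 20))) ≤ 3 := by omega
          have hstep : pvStepA (p, PySem.Dict.mk la) x
              = (p, pvDictA (pvMk (PySem.Str.strip x)).1 (pvMk (PySem.Str.strip x)).2.1
                  (pvMk (PySem.Str.strip x)).2.2 (PySem.Dict.mk la)) := by
            simp only [pvStepA, if_pos hA, if_pos hb3]
            unfold pvDictA pvMk
            split_ifs <;> rfl
          have hplain : pvPlainB (x :: xs) = pvPlainB xs := by
            unfold pvPlainB
            rw [hrecs, List.filter_cons_of_neg (p := fun l => decide (PySem.Str.len (PySem.Str.strip (PySem.Str.slice l (some 16) (some 20))) ≤ 3)) (fun hpa => hle (of_decide_eq_true hpa))]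
          have halts : pvAltsB (x :: xs) = pvMk (PySem.Str.strip x) :: pvAltsB xs := by
            unfold pvAltsB pvMk
            rw [hrecs, List.filter_cons_of_pos (p := fun l => decide (PySem.Str.len (PySem.Str.strip (PySem.Str.slice l (some 16) (some 20))) > 3)) (decide_eq_true hb3), List.map_cons]
          rw [List.foldl_cons, hstep, pvDictA_eq _ _ _ la h,
            ih p _ (pvNodup_upA _ _ _ la h), hplain, halts, List.foldl_cons]
        · have hle : PySem.Str.len (PySem.Str.strip
              (PySem.Str.slice (PySem.Str.strip x) (some 16) (some 20))) ≤ 3 := by omega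
          have hstep : pvStepA (p, PySem.Dict.mk la) x
              = (p ++ [PySem.Str.strip x], PySem.Dict.mk la) := by
            simp only [pvStepA, if_pos hA, if_neg hb3]
          have hplain : pvPlainB (x :: xs) = PySem.Str.strip x :: pvPlainB xs := by
            unfold pvPlainB
            rw [hrecs, List.filter_cons_of_pos (p := fun l => decide (PySem.Str.len (PySem.Str.strip (PySem.Str.slice l (some 16) (some 20))) ≤ 3)) (decide_eq_true hle)]
          have halts : pvAltsB (x :: xs) = pvAltsB xs := by
            unfold pvAltsB
            rw [hrecs, List.filter_cons_of_neg (p := fun l => decide (PySem.Str.len (PySem.Str.strip (PySem.Str.slice l (some 16) (some 20))) > 3)) (fun hpa => hb3 (of_decide_eq_true hpa))]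
          rw [List.foldl_cons, hstep, ih _ _ h, hplain, halts]
          simp
      · have hstep : pvStepA (p, PySem.Dict.mk la) x = (p, PySem.Dict.mk la) := by
          simp only [pvStepA, if_neg hA]
        have hrecs : pvRecsB (x :: xs) = pvRecsB xs := by
          simp [pvRecsB, hA]
        rw [List.foldl_cons, hstep, ih _ _ h]
        simp [pvPlainB, pvAltsB, hrecs]

lemma pvUpA_not_mem (sig occ fix : String) (la : List (String × String × String))
    (h : sig ∉ la.map (fun p => p.1)) :
    pvUpA sig occ fix la = la ++ [(sig, (occ, fix))] := by
  induction la with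
  | nil => rfl
  | cons q rest ih =>
      simp only [List.map_cons, List.mem_cons, not_or] at h
      have hq : ¬ q.1 = sig := fun e => h.1 e.symm
      simp [pvUpA, hq, ih h.2]

lemma pvUpA_map_mem (sig occ fix : String) (ks : List String) (g : String → String × String)
    (hn : ks.Nodup) (hm : sig ∈ ks) :
    pvUpA sig occ fix (ks.map (fun k => (k, g k))) =
      ks.map (fun k => (k, if k = sig then (if (g sig).1 < occ then (occ, fix) else g sig)
                           else g k)) := by
  induction ks with
  | nil => cases hm
  | cons k ks ih =>
      simp only [List.nodup_cons] at hn
      obtain ⟨hk, hn'⟩ := hn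
      by_cases hks : k = sig
      · subst hks
        have hmap : ks.map (fun k' => (k', if k' = k then
              (if (g k).1 < occ then (occ, fix) else g k) else g k')) =
            ks.map (fun k' => (k', g k')) := by
          apply List.map_congr_left
          intro q hq
          have : ¬ q = k := fun e => hk (e ▸ hq)
          simp [this]
        by_cases hlt : (g k).1 < occ <;>
        · simp [pvUpA, hlt]
          intro a ha e
          exact absurd (e ▸ ha) hk
      · have hm' : sig ∈ ks := by
          rcases List.mem_cons.mp hm with h | h
          · exact absurd h.symm hks
          · exact h
        have hne : ¬ k = sig := hks
        simp [pvUpA, hne, ih hn' hm']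

lemma pvDedup_append (m : List String) (x : String) :
    PySem.List.dedup (m ++ [x]) =
      if x ∈ PySem.List.dedup m then PySem.List.dedup m
      else PySem.List.dedup m ++ [x] := by
  unfold PySem.List.dedup
  rw [PySem.Set.ofList_eq_foldl, List.foldl_append, List.foldl_cons, List.foldl_nil,
    ← PySem.Set.ofList_eq_foldl]
  unfold PySem.Set.add
  by_cases hm : x ∈ PySem.Set.ofList m
  · rw [if_pos (by simpa [PySem.Set.contains] using hm), if_pos hm]
  · rw [if_neg (by simpa [PySem.Set.contains] using hm), if_neg hm]

lemma pvM_append_ne (as : List (String × String × String)) (r : String × String × String)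
    (k : String) (hk : ¬ r.1 = k) : pvM (as ++ [r]) k = pvM as k := by
  unfold pvM
  rw [List.filter_append, show List.filter (fun c => c.1 == k) [r] = [] by simp [hk],
    List.append_nil]

lemma pvM_append_mem (as : List (String × String × String)) (r : String × String × String)
    (h : r.1 ∈ as.map (fun c => c.1)) :
    pvM (as ++ [r]) r.1 = if (pvM as r.1).1 < r.2.1 then r.2 else pvM as r.1 := by
  obtain ⟨c0, hc0, hc0e⟩ := List.mem_map.mp h
  have hne : as.filter (fun c => c.1 == r.1) ≠ [] := by
    intro he
    have hin : c0 ∈ as.filter (fun c => c.1 == r.1) :=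
      List.mem_filter.mpr ⟨hc0, by simp [hc0e]⟩
    rw [he] at hin
    cases hin
  unfold pvM
  rw [List.filter_append, show List.filter (fun c => c.1 == r.1) [r] = [r] by simp]
  cases hf : as.filter (fun c => c.1 == r.1) with
  | nil => exact absurd hf hne
  | cons c cs =>
      show (pvSel c (cs ++ [r])).2 = _
      unfold pvSel
      rw [List.foldl_append, List.foldl_cons, List.foldl_nil]
      split_ifs <;> rfl

lemma pvM_append_new (as : List (String × String × String)) (r : String × String × String)
    (h : r.1 ∉ as.map (fun c => c.1)) : pvM (as ++ [r]) r.1 = r.2 := by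
  have hf : as.filter (fun c => c.1 == r.1) = [] := by
    rw [List.filter_eq_nil_iff]
    intro c hc hb
    exact h (List.mem_map.mpr ⟨c, hc, by simpa using hb⟩)
  unfold pvM
  rw [List.filter_append, hf, show List.filter (fun c => c.1 == r.1) [r] = [r] by simp]
  rfl

-- the folded dict list IS: first-seen signatures, each with its first-maximal candidate
lemma pvBuild (alts : List (String × String × String)) :
    alts.foldl (fun d r => pvUpA r.1 r.2.1 r.2.2 d) [] =
      (PySem.List.dedup (alts.map (fun c => c.1))).map (fun k => (k, pvM alts k)) := by
  induction alts using List.reverseRecOn with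
  | nil => rfl
  | append_singleton as r ih =>
      rw [List.foldl_append, List.foldl_cons, List.foldl_nil, ih]
      have hnod : (PySem.List.dedup (as.map (fun c => c.1))).Nodup :=
        PySem.List.nodup_dedup _
      rw [show (as ++ [r]).map (fun c => c.1) = as.map (fun c => c.1) ++ [r.1] by simp,
        pvDedup_append]
      by_cases hm : r.1 ∈ PySem.List.dedup (as.map (fun c => c.1))
      · rw [if_pos hm, pvUpA_map_mem r.1 r.2.1 r.2.2 _ _ hnod hm]
        apply List.map_congr_left
        intro k hkk
        by_cases hkr : k = r.1
        · subst hkr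
          rw [pvM_append_mem as r ((PySem.List.mem_dedup _ _).mp hm)]
          simp
        · have : ¬ r.1 = k := fun e => hkr e.symm
          rw [pvM_append_ne as r k this]
          simp [hkr]
      · rw [if_neg hm,
          pvUpA_not_mem r.1 r.2.1 r.2.2 _ (by simpa using hm),
          List.map_append]
        congr 1
        · apply List.map_congr_left
          intro k hkk
          have : ¬ r.1 = k := fun e => hm (e ▸ hkk)
          rw [pvM_append_ne as r k this]
        · rw [show List.map (fun k => (k, pvM (as ++ [r]) k)) [r.1]
              = [(r.1, pvM (as ++ [r]) r.1)] by simp,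
            pvM_append_new as r (fun hc => hm ((PySem.List.mem_dedup _ _).mpr hc))]

lemma pvMax3 : ∀ (cs : List (String × String × String)) (c : String × String × String),
    PySem.List.max? (c :: cs) (fun x => x.2.1) = some (pvSel c cs) := by
  intro cs
  induction cs with
  | nil => intro c; rfl
  | cons x cs ih =>
      intro c
      have h1 : PySem.List.max? (c :: x :: cs) (fun y => y.2.1)
          = PySem.List.max? ((if c.2.1 < x.2.1 then x else c) :: cs) (fun y => y.2.1) := by
        simp only [PySem.List.max?, List.foldl_cons]
        congr 1
        show (if c.2.1 < x.2.1 then some x else some c) = some (if c.2.1 < x.2.1 then x else c)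
        rw [apply_ite some]
      rw [h1, ih]
      simp [pvSel]

-- A's program, in closed form
lemma pvAltA (lines : List String) :
    altloc_filter lines =
      pvPlainB lines ++ (PySem.List.dedup ((pvAltsB lines).map (fun c => c.1))).map
        (fun k => (pvM (pvAltsB lines) k).2) := by
  have h0 : lines.foldl pvStepA ([], PySem.Dict.empty) =
      ([] ++ pvPlainB lines,
       PySem.Dict.mk ((pvAltsB lines).foldl (fun d r => pvUpA r.1 r.2.1 r.2.2 d) [])) :=
    pvFoldA lines [] [] (by simp)
  simp only [altloc_filter]
  rw [h0, pvBuild, PySem.List.foldl_append_singleton_eq_map, List.nil_append]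
  congr 1
  have hks : (PySem.Dict.mk ((PySem.List.dedup ((pvAltsB lines).map (fun c => c.1))).map
        (fun k => (k, pvM (pvAltsB lines) k)))).keys
        = PySem.List.dedup ((pvAltsB lines).map (fun c => c.1)) := by
      simp [PySem.Dict.keys, Function.comp_def]
  rw [hks]
  apply List.map_congr_left
  intro k hk
  have hnk : (PySem.Dict.mk ((PySem.List.dedup ((pvAltsB lines).map (fun c => c.1))).map
      (fun k => (k, pvM (pvAltsB lines) k)))).keys.Nodup := by
    rw [hks]
    exact PySem.List.nodup_dedup _
  have hmem : (k, pvM (pvAltsB lines) k)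
      ∈ (PySem.Dict.mk ((PySem.List.dedup ((pvAltsB lines).map (fun c => c.1))).map
          (fun k => (k, pvM (pvAltsB lines) k)))).items :=
    List.mem_map.mpr ⟨k, hk, rfl⟩
  rw [PySem.Dict.getD_of_mem_items _ hmem hnk ("", "")]

-- B's program, in closed form
lemma pvAltB (lines : List String) :
    altloc_filter_alt lines =
      pvPlainB lines ++ (PySem.List.dedup ((pvAltsB lines).map (fun c => c.1))).map
        (fun k => (pvM (pvAltsB lines) k).2) := by
  unfold altloc_filter_alt
  rw [PySem.List.foldl_append_singleton_eq_map]
  congr 1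
  apply List.map_congr_left
  intro k hk
  have hkm : k ∈ (pvAltsB lines).map (fun c => c.1) := (PySem.List.mem_dedup _ _).mp hk
  obtain ⟨c0, hc0, hc0e⟩ := List.mem_map.mp hkm
  have hne : (pvAltsB lines).filter (fun c => c.1 == k) ≠ [] := by
    intro he
    have hin : c0 ∈ (pvAltsB lines).filter (fun c => c.1 == k) :=
      List.mem_filter.mpr ⟨hc0, by simp [hc0e]⟩
    rw [he] at hin
    cases hin
  cases hf : (pvAltsB lines).filter (fun c => c.1 == k) with
  | nil => exact absurd hf hne
  | cons c cs =>
      unfold PySem.List.maxD pvM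
      rw [hf, pvMax3]
      simp

-- ===== VERDICT (by name: the statement is the Claim_ definition above) =====
theorem altloc_filter_spec : Claim_equal_altloc_filter := by
  intro lines _
  unfold Spec_altloc_filter
  rw [pvAltA, pvAltB]
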